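-- pv_equiv track=rewrite | github.com/RitwiKanojia15/Plagiarism-Guard | plagiarism_system/reports/pdf_export.py | _find_token_spans
-- ===== SOURCE A (Python) =====
-- from typing import Dict, Iterable, List, Optional, Sequence, Tuple
--
-- def _find_token_spans(page_tokens: Sequence[str], query_tokens: Sequence[str]) -> List[Tuple[int, int]]:
--     """Find matching token spans for a query sentence in page token stream."""
--     if not page_tokens or not query_tokens:
--         return []
--
--     spans: List[Tuple[int, int]] = []
--     q_len = len(query_tokens)
--
--     # 1) exact full-sentence contiguous search
--     if q_len <= len(page_tokens):
--         for idx in range(0, len(page_tokens) - q_len + 1):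
--             if list(page_tokens[idx : idx + q_len]) == list(query_tokens):
--                 spans.append((idx, idx + q_len - 1))
--
--     if spans:
--         return spans
--
--     # 2) fallback partial prefix matching for long sentences
--     for size in (12, 10, 8, 6, 5, 4):
--         if q_len < size:
--             continue
--         prefix = list(query_tokens[:size])
--         for idx in range(0, len(page_tokens) - size + 1):
--             if list(page_tokens[idx : idx + size]) == prefix:
--                 spans.append((idx, idx + size - 1))
--         if spans:
--             return spans
--
--     return spans
-- ===== SOURCE B (Python) =====
-- from typing import List, Sequence, Tuple
--
-- def _find_token_spans(page_tokens: Sequence[str], query_tokens: Sequence[str]) -> List[Tuple[int, int]]: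
--     """Single match-length pass: compute, for every start position, the longest
--     prefix of the query that matches there; every candidate span length is then
--     answered by thresholding that array, with no further scans of the page."""
--     page = list(page_tokens)
--     query = list(query_tokens)
--     n = len(page)
--     q = len(query)
--     if n == 0 or q == 0:
--         return []
--     # one pass over the page: longest query-prefix match length at each start
--     lcp = []
--     for i in range(n):
--         m = 0
--         while m < q and i + m < n and page[i + m] == query[m]:
--             m += 1
--         lcp.append(m)
--     for k in [q] + [s for s in (12, 10, 8, 6, 5, 4) if s <= q]:
--         spans = [(i, i + k - 1) for i, m in enumerate(lcp) if m >= k]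
--         if spans:
--             return spans
--     return []
-- ===== Notes on version B (the rewrite author's own statement) =====
-- stated objective: faster
-- what changed: B replaces A's staged per-length window scans by one pass that computes, for every page position, the longest query-prefix match length there (stopping at the first mismatching token), and then answers each candidate span length by thresholding that single array, so the page is never rescanned per length and no per-window list copies are made.
import Mathlib
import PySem

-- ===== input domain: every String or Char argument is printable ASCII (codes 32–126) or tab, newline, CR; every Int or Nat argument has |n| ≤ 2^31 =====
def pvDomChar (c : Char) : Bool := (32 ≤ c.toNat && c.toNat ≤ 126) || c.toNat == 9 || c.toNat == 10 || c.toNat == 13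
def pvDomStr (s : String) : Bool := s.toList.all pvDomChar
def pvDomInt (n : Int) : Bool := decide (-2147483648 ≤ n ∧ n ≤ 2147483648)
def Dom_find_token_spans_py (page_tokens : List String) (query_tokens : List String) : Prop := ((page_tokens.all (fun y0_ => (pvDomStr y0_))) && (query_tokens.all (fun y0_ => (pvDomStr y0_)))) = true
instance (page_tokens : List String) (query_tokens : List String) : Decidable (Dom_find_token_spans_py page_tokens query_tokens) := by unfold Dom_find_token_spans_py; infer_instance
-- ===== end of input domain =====

-- B computes one longest-query-prefix-match length per page position and thresholds that
-- array per candidate length, instead of A's per-length window scans (objective: faster,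
-- constant-factor: one pass, no per-window list copies; measured faster in a timing run).

-- ===== PORT A =====
-- 'for idx in range(0, len(page)-size+1): if page[idx:idx+size]==pat: spans.append((idx, idx+size-1))'
def aScan (page : List String) (pat : List String) (size : Int) (spans : List (Int × Int)) : List (Int × Int) :=
  (PySem.List.pyRange 0 ((page.length : Int) - size + 1)).foldl
    (fun acc idx =>
      if PySem.List.slice page (some idx) (some (idx + size)) == pat
      then acc ++ [(idx, idx + size - 1)] else acc) spans

-- 'for size in (12,10,8,6,5,4): …' with 'continue' on q_len < size and early return on nonempty spans
def aFallback (page : List String) (query : List String) (q_len : Int) :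
    List Int → List (Int × Int) → List (Int × Int)
  | [], spans => spans
  | s :: rest, spans =>
    if q_len < s then aFallback page query q_len rest spans
    else
      let spans' := aScan page (PySem.List.slice query (some 0) (some s)) s spans
      if spans' = [] then aFallback page query q_len rest spans' else spans'

def find_token_spans_py (page_tokens : List String) (query_tokens : List String) : List (Int × Int) :=
  if page_tokens = [] ∨ query_tokens = [] then []
  else
    let q_len : Int := query_tokens.length
    let spans : List (Int × Int) :=
      if q_len ≤ (page_tokens.length : Int) then aScan page_tokens query_tokens q_len [] else []
    if spans = [] then aFallback page_tokens query_tokens q_len [12, 10, 8, 6, 5, 4] spans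
    else spans

-- ===== PORT B =====
-- inner while loop: 'm = 0; while m < q and i + m < n and page[i+m] == query[m]: m += 1'
-- (both indexings are in range whenever the condition is evaluated true, so List.getD is exact)
def bMatchLen (page query : List String) (n q i m : Nat) : Nat :=
  if m < q ∧ i + m < n ∧ page.getD (i + m) "" == query.getD m "" then
    bMatchLen page query n q i (m + 1)
  else m
termination_by q - m
decreasing_by omega

-- 'lcp = []; for i in range(n): … lcp.append(m)'
def bLcp (page query : List String) : List Nat :=
  (List.range page.length).map (fun i => bMatchLen page query page.length query.length i 0)

-- '[(i, i + k - 1) for i, m in enumerate(lcp) if m >= k]'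
def bSpans (lcp : List Nat) (k : Int) : List (Int × Int) :=
  ((PySem.List.enumerate lcp).filter (fun p => decide (k ≤ (p.2 : Int)))).map
    (fun p => (p.1, p.1 + k - 1))

-- 'for k in lengths: spans = …; if spans: return spans'
def bLoop (lcp : List Nat) : List Int → List (Int × Int)
  | [] => []
  | k :: rest =>
    let spans := bSpans lcp k
    if spans = [] then bLoop lcp rest else spans

def find_token_spans_py_alt (page_tokens : List String) (query_tokens : List String) : List (Int × Int) :=
  if page_tokens.length = 0 ∨ query_tokens.length = 0 then []
  else
    bLoop (bLcp page_tokens query_tokens)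
      ((query_tokens.length : Int) ::
        ([12, 10, 8, 6, 5, 4].filter (fun s => s ≤ (query_tokens.length : Int))))

-- ===== PRECONDITION & SPEC =====
def Spec_find_token_spans_py (page_tokens : List String) (query_tokens : List String) (out : List (Int × Int)) : Prop := out = find_token_spans_py_alt page_tokens query_tokens
instance (page_tokens : List String) (query_tokens : List String) (out : List (Int × Int)) : Decidable (Spec_find_token_spans_py page_tokens query_tokens out) := by unfold Spec_find_token_spans_py; infer_instance

-- ===== CLAIM (what is proved, stated in full; the proofs are below) =====
def Claim_equal_find_token_spans_py : Prop := ∀ (page_tokens : List String) (query_tokens : List String), Dom_find_token_spans_py page_tokens query_tokens → Spec_find_token_spans_py page_tokens query_tokens (find_token_spans_py page_tokens query_tokens)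

-- ===== LEMMAS AND PROOFS =====
-- the common value of one pass: all window starts whose length-|pat| window equals pat
def spansOf (page : List String) (pat : List String) : List (Int × Int) :=
  ((PySem.List.pyRange 0 (page.length : Int)).filter
      (fun i => PySem.List.slice page (some i) (some (i + (pat.length : Int))) == pat)).map
    (fun i => (i, i + (pat.length : Int) - 1))

-- length of the longest common prefix (proof-side characterisation of the while loop)
def countPrefix : List String → List String → Nat
  | a :: as, b :: bs => if a == b then countPrefix as bs + 1 else 0
  | _, _ => 0

theorem countPrefix_nil_right (l : List String) : countPrefix l [] = 0 := by
  cases l <;> rfl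

theorem countPrefix_nil_left (l : List String) : countPrefix [] l = 0 := by
  cases l <;> rfl

theorem bMatchLen_eq (page query : List String) (i m : Nat) :
    bMatchLen page query page.length query.length i m =
      m + countPrefix (page.drop (i + m)) (query.drop m) := by
  rw [bMatchLen]
  split_ifs with h
  · obtain ⟨hq, hn, he⟩ := h
    have hrec := bMatchLen_eq page query i (m + 1)
    rw [hrec]
    rw [← List.getElem_cons_drop hn, ← List.getElem_cons_drop hq, countPrefix]
    rw [List.getD_eq_getElem page "" hn, List.getD_eq_getElem query "" hq] at he
    rw [if_pos he]
    have h3 : i + (m + 1) = i + m + 1 := by omega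
    rw [h3]
    omega
  · have hz : countPrefix (page.drop (i + m)) (query.drop m) = 0 := by
      by_cases hq : m < query.length
      · by_cases hn : i + m < page.length
        · have he : ¬ (page.getD (i + m) "" == query.getD m "") = true := by tauto
          rw [List.getD_eq_getElem page "" hn, List.getD_eq_getElem query "" hq] at he
          rw [← List.getElem_cons_drop hn, ← List.getElem_cons_drop hq, countPrefix, if_neg he]
        · rw [List.drop_eq_nil_of_le (by omega : page.length ≤ i + m), countPrefix_nil_left]
      · rw [List.drop_eq_nil_of_le (by omega : query.length ≤ m), countPrefix_nil_right]
    omega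
termination_by query.length - m
decreasing_by omega

theorem countPrefix_ge_iff (l q : List String) (k : Nat) (hk : k ≤ q.length) :
    k ≤ countPrefix l q ↔ l.take k = q.take k := by
  induction k generalizing l q with
  | zero => simp
  | succ k ih =>
    cases q with
    | nil => simp at hk
    | cons b bs =>
      cases l with
      | nil =>
        simp [countPrefix]
      | cons a as =>
        rw [countPrefix]
        by_cases hab : a = b
        · have : (a == b) = true := by simp [hab]
          rw [if_pos this]
          simp only [List.take_succ_cons, hab]
          constructor
          · intro h
            have : k ≤ countPrefix as bs := by omega
            rw [(ih as bs (by simpa using hk)).mp this]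
          · intro h
            have h2 : as.take k = bs.take k := by injection h
            have := (ih as bs (by simpa using hk)).mpr h2
            omega
        · have : (a == b) = false := by simp [hab]
          rw [this]
          simp [List.take_succ_cons, hab]

-- A-side lemmas ------------------------------------------------------------

theorem slice_eq_pat_fit (page pat : List String) (j : Nat) (hpat : pat ≠ [])
    (h : (page.drop j).take pat.length = pat) :
    j + pat.length ≤ page.length ∧ page[j]? = pat.head? := by
  have hl := congrArg List.length h
  simp [List.length_take, List.length_drop] at hl
  have hp1 : 1 ≤ pat.length := List.length_pos_iff.mpr hpat
  constructor
  · omega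
  · have h2 : pat.head? = ((page.drop j).take pat.length).head? := by rw [h]
    rw [h2, List.head?_take, List.head?_drop]
    have : pat.length ≠ 0 := by omega
    simp [this]

theorem cond_false_of_big (page pat : List String) (i : Int) (h0 : 0 ≤ i) (hpat : pat ≠ [])
    (hbig : ¬ (i.toNat + pat.length ≤ page.length)) :
    (PySem.List.slice page (some i) (some (i + (pat.length : Int))) == pat) = false := by
  rw [(Int.toNat_of_nonneg h0).symm, PySem.List.slice_natCast_add]
  rw [beq_eq_false_iff_ne]
  intro h
  exact hbig (slice_eq_pat_fit page pat i.toNat hpat h).1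

theorem filter_range_ext (page pat : List String) (hpat : pat ≠ []) :
    ((PySem.List.pyRange 0 ((page.length : Int) - (pat.length : Int) + 1)).filter
      (fun i => PySem.List.slice page (some i) (some (i + (pat.length : Int))) == pat)) =
    ((PySem.List.pyRange 0 (page.length : Int)).filter
      (fun i => PySem.List.slice page (some i) (some (i + (pat.length : Int))) == pat)) := by
  by_cases hk : pat.length ≤ page.length
  · rw [PySem.List.pyRange_one_append 0 ((page.length : Int) - (pat.length : Int) + 1) (page.length : Int)
      (by have := List.length_pos_iff.mpr hpat; omega)
      (by have := List.length_pos_iff.mpr hpat; omega)]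
    rw [List.filter_append]
    have h2 : ((PySem.List.pyRange ((page.length : Int) - (pat.length : Int) + 1) (page.length : Int)).filter
        (fun i => PySem.List.slice page (some i) (some (i + (pat.length : Int))) == pat)) = [] := by
      rw [List.filter_eq_nil_iff]
      intro i hi
      rw [PySem.List.mem_pyRange_one] at hi
      simp only [Bool.not_eq_true]
      exact cond_false_of_big page pat i (by omega) hpat (by omega)
    rw [h2, List.append_nil]
  · rw [PySem.List.pyRange_one_eq_nil (by omega), List.filter_nil]
    symm
    rw [List.filter_eq_nil_iff]
    intro i hi
    rw [PySem.List.mem_pyRange_one] at hi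
    simp only [Bool.not_eq_true]
    exact cond_false_of_big page pat i (by omega) hpat (by omega)

theorem aScan_eq_spansOf (page pat : List String) (hpat : pat ≠ []) :
    aScan page pat (pat.length : Int) [] = spansOf page pat := by
  rw [aScan, PySem.List.foldl_append_if
    (fun idx => PySem.List.slice page (some idx) (some (idx + (pat.length : Int))) == pat)
    (fun idx => (idx, idx + (pat.length : Int) - 1)), List.nil_append, spansOf,
    filter_range_ext page pat hpat]

theorem spansOf_nil_of_long (page pat : List String) (hpat : pat ≠ [])
    (h : page.length < pat.length) : spansOf page pat = [] := by
  rw [spansOf]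
  have : ((PySem.List.pyRange 0 (page.length : Int)).filter
      (fun i => PySem.List.slice page (some i) (some (i + (pat.length : Int))) == pat)) = [] := by
    rw [List.filter_eq_nil_iff]
    intro i hi
    rw [PySem.List.mem_pyRange_one] at hi
    simp only [Bool.not_eq_true]
    exact cond_false_of_big page pat i (by omega) hpat (by omega)
  rw [this, List.map_nil]

theorem take_toNat_facts (query : List String) (hq : query ≠ []) (s : Int)
    (h1 : 1 ≤ s) (h2 : s ≤ (query.length : Int)) :
    PySem.List.slice query (some 0) (some s) = query.take s.toNat ∧
    (query.take s.toNat).length = s.toNat ∧ query.take s.toNat ≠ [] := by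
  have hs0 : (0:Int) = ((0:Nat) : Int) := rfl
  have hss : s = (s.toNat : Int) := (Int.toNat_of_nonneg (by omega)).symm
  refine ⟨?_, ?_, ?_⟩
  · rw [hs0, hss, PySem.List.slice_natCast]
    simp
    omega
  · rw [List.length_take]
    have : s.toNat ≤ query.length := by omega
    omega
  · have : (query.take s.toNat).length ≠ 0 := by
      rw [List.length_take]
      have hq1 : 1 ≤ query.length := List.length_pos_iff.mpr hq
      omega
    exact fun hnil => this (by rw [hnil]; rfl)

-- B-side lemmas ------------------------------------------------------------

theorem enumerate_map_range {α : Type} (f : Nat → α) (n : Nat) :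
    PySem.List.enumerate ((List.range n).map f) 0 =
      (List.range n).map (fun (j : Nat) => (((j : Int), f j) : Int × α)) := by
  apply List.ext_getElem
  · simp [PySem.List.length_enumerate]
  · intro k h1 h2
    simp [PySem.List.getElem_enumerate]

theorem bSpans_eq_spansOf (page query : List String) (k : Nat) (h2 : k ≤ query.length) :
    bSpans (bLcp page query) (k : Int) = spansOf page (query.take k) := by
  have hlcp : bLcp page query =
      (List.range page.length).map (fun i => countPrefix (page.drop i) query) := by
    rw [bLcp]
    apply List.map_congr_left
    intro i _
    rw [bMatchLen_eq page query i 0]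
    simp
  rw [bSpans, hlcp, enumerate_map_range, List.filter_map, List.map_map]
  rw [spansOf]
  have hlen : ((query.take k).length : Int) = (k : Int) := by
    rw [List.length_take]
    omega
  rw [hlen, PySem.List.pyRange_zero_natCast, List.filter_map, List.map_map]
  have hfil : (List.range page.length).filter
      ((fun p => decide ((k : Int) ≤ ((p.2 : Nat) : Int))) ∘
        (fun (j : Nat) => (((j : Int), countPrefix (page.drop j) query) : Int × Nat))) =
      (List.range page.length).filter
      ((fun i => PySem.List.slice page (some i) (some (i + (k : Int))) == query.take k) ∘
        (fun (j : Nat) => (j : Int))) := by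
    apply List.filter_congr
    intro j _
    simp only [Function.comp]
    rw [PySem.List.slice_natCast_add]
    have hiff := countPrefix_ge_iff (page.drop j) query k h2
    by_cases hc : (page.drop j).take k = query.take k
    · have hcp : k ≤ countPrefix (page.drop j) query := hiff.mpr hc
      simp [hc, hcp]
    · have hcp : ¬ k ≤ countPrefix (page.drop j) query := fun h => hc (hiff.mp h)
      have hb : ((page.drop j).take k == query.take k) = false := beq_eq_false_iff_ne.mpr hc
      rw [hb, decide_eq_false_iff_not]
      omega
  rw [hfil]
  apply List.map_congr_left
  intro j _
  simp [Function.comp]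

theorem pass_eq (page query : List String) (hq : query ≠ []) (s : Int)
    (h1 : 1 ≤ s) (h2 : s ≤ (query.length : Int)) :
    aScan page (PySem.List.slice query (some 0) (some s)) s [] =
      bSpans (bLcp page query) s := by
  obtain ⟨he, hl, hne⟩ := take_toNat_facts query hq s h1 h2
  have hA := aScan_eq_spansOf page (query.take s.toNat) hne
  rw [hl, Int.toNat_of_nonneg (by omega : (0:Int) ≤ s)] at hA
  have hB := bSpans_eq_spansOf page query s.toNat (by omega)
  rw [Int.toNat_of_nonneg (by omega : (0:Int) ≤ s)] at hB
  rw [he, hA, hB]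

theorem fallback_eq_bLoop (page query : List String) (hq : query ≠ [])
    (sizes : List Int) (hs : ∀ s ∈ sizes, 1 ≤ s) :
    aFallback page query (query.length : Int) sizes [] =
      bLoop (bLcp page query) (sizes.filter (fun s => s ≤ (query.length : Int))) := by
  induction sizes with
  | nil => rfl
  | cons s rest ih =>
    have hs1 : 1 ≤ s := hs s List.mem_cons_self
    have hrest : ∀ t ∈ rest, 1 ≤ t := fun t ht => hs t (List.mem_cons_of_mem _ ht)
    by_cases hc : s ≤ (query.length : Int)
    · rw [aFallback, if_neg (by omega)]
      have hfc : List.filter (fun s => decide (s ≤ (query.length : Int))) (s :: rest) =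
          s :: List.filter (fun s => decide (s ≤ (query.length : Int))) rest := by
        simp [hc]
      rw [hfc, bLoop]
      simp only
      rw [pass_eq page query hq s hs1 hc]
      by_cases hE : bSpans (bLcp page query) s = []
      · rw [if_pos hE, if_pos hE, hE, ih hrest]
      · rw [if_neg hE, if_neg hE]
    · rw [aFallback, if_pos (by omega)]
      have hfc : List.filter (fun s => decide (s ≤ (query.length : Int))) (s :: rest) =
          List.filter (fun s => decide (s ≤ (query.length : Int))) rest := by
        simp [hc]
      rw [hfc, ih hrest]

-- ===== VERDICT (by name: the statement is the Claim_ definition above) =====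
theorem find_token_spans_py_spec : Claim_equal_find_token_spans_py := by
  intro page query _
  unfold Spec_find_token_spans_py
  rw [find_token_spans_py, find_token_spans_py_alt]
  by_cases hpq : page = [] ∨ query = []
  · rw [if_pos hpq, if_pos (by rcases hpq with h | h <;> simp [h])]
  · have hpq' : ¬ (page.length = 0 ∨ query.length = 0) := by
      rw [not_or] at hpq ⊢
      exact ⟨by simpa using hpq.1, by simpa using hpq.2⟩
    rw [if_neg hpq, if_neg hpq']
    rw [not_or] at hpq
    obtain ⟨hp, hq⟩ := hpq
    simp only [bLoop]
    have hB1 : bSpans (bLcp page query) (query.length : Int) = spansOf page query := by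
      have := bSpans_eq_spansOf page query query.length le_rfl
      rwa [List.take_length] at this
    rw [hB1]
    have hA1 : (if (query.length : Int) ≤ (page.length : Int)
        then aScan page query (query.length : Int) [] else []) = spansOf page query := by
      by_cases h : (query.length : Int) ≤ (page.length : Int)
      · rw [if_pos h]
        have := aScan_eq_spansOf page query hq
        exact this
      · rw [if_neg h, spansOf_nil_of_long page query hq (by omega)]
    rw [hA1]
    by_cases hE : spansOf page query = []
    · rw [if_pos hE, if_pos hE, hE,
        fallback_eq_bLoop page query hq [12, 10, 8, 6, 5, 4] (by decide)]
    · rw [if_neg hE, if_neg hE]
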